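-- pv_equiv track=rewrite | github.com/onikw/ASD | Grafy/Bellman-Ford.py | mgraf
-- ===== SOURCE A (Python) =====
-- def mgraf(L):
--     n = len(L)
--     maks = 0
--     for i in range(n):
--         x, y, z = L[i]
--         maks = max(maks, x, y)
--     G = [[] for _ in range(maks + 1)]
--     for i in range(n):
--         u, v, w = L[i]
--         G[u].append((v, w))
--         G[v].append((u, w))
--     return G
-- ===== SOURCE B (Python) =====
-- def mgraf(L):
--     G = [[]]
--     for u, v, w in L:
--         while len(G) <= u or len(G) <= v:
--             G.append([])
--         G[u].append((v, w))
--         G[v].append((u, w))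
--     return G
-- ===== Notes on version B (the rewrite author's own statement) =====
-- stated objective: simpler
-- what changed: B replaces A's two passes (find the max vertex id, preallocate, then fill) with a single pass that grows the adjacency list on demand while appending edges.
-- outside the precondition, e.g. on mgraf([(-2, 0, 0), (1, 0, 0)]): A returns [[(0, 0), (-2, 0), (1, 0)], [(0, 0)]], B raises IndexError
import Mathlib
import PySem

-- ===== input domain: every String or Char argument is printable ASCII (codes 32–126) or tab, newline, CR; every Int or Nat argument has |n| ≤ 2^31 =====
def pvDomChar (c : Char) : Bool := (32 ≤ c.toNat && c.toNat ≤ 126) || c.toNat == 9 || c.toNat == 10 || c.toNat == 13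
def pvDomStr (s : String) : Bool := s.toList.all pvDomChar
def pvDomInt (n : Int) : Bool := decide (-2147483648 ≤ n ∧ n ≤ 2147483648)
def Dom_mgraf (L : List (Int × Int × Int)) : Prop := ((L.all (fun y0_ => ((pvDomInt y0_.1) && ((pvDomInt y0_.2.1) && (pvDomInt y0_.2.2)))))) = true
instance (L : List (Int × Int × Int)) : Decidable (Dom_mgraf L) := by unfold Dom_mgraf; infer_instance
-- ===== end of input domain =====

-- B builds the adjacency list in ONE pass, growing it on demand, instead of A's
-- two passes (max-finding, then filling a preallocated list): objective = simpler.

-- shared primitive: `G[i].append(p)` (Python index semantics: negative i counts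
-- from the end; exact for in-range i, which is all Pre_ admits)
def appendAt (G : List (List (Int × Int))) (i : Int) (p : Int × Int) :
    List (List (Int × Int)) :=
  let j : Nat := if 0 ≤ i then i.toNat else ((G.length : Int) + i).toNat
  G.set j (G.getD j [] ++ [p])

-- ===== PORT A =====
def mgraf (L : List (Int × Int × Int)) : List (List (Int × Int)) :=
  let maks : Int := L.foldl (fun m t => max (max m t.1) t.2.1) 0
  let G : List (List (Int × Int)) := (List.range (maks + 1).toNat).map (fun _ => [])
  L.foldl (fun G t => appendAt (appendAt G t.1 (t.2.1, t.2.2)) t.2.1 (t.1, t.2.2)) G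

-- ===== PORT B =====
-- `while len(G) <= u or len(G) <= v: G.append([])` (fuel = the number of
-- iterations left, computed from the loop bound so the recursion is structural)
def growToGo (u v : Int) : Nat → List (List (Int × Int)) → List (List (Int × Int))
  | 0, G => G
  | f + 1, G =>
    if (G.length : Int) ≤ u ∨ (G.length : Int) ≤ v then growToGo u v f (G ++ [[]]) else G

def growTo (G : List (List (Int × Int))) (u v : Int) : List (List (Int × Int)) :=
  growToGo u v (max u v + 1 - (G.length : Int)).toNat G

def mgraf_alt (L : List (Int × Int × Int)) : List (List (Int × Int)) :=
  L.foldl (fun G t =>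
      let G := growTo G t.1 t.2.1
      appendAt (appendAt G t.1 (t.2.1, t.2.2)) t.2.1 (t.1, t.2.2))
    [[]]

-- ===== PRECONDITION & SPEC =====
-- helpers for Pre_: the running maximum endpoint (floored at 0) and the scan below
def maxV (L : List (Int × Int × Int)) : Int :=
  L.foldl (fun m t => max (max m t.1) t.2.1) 0

def preOk (m tot : Int) : List (Int × Int × Int) → Bool
  | [] => true
  | t :: rest =>
    let m' := max (max m t.1) t.2.1
    ((0 ≤ t.1 && 0 ≤ t.2.1)
      || (m' == tot && (-(tot + 1) ≤ t.1 && -(tot + 1) ≤ t.2.1)))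
    && preOk m' tot rest

-- Pre_ excludes edge lists in which an edge with a negative endpoint appears before
-- the running endpoint maximum has reached its final value, or has an endpoint below
-- -(max+1): there Python's negative indexing resolves against different list lengths
-- in A and B (so their values differ accidentally), or raises IndexError.
def Pre_mgraf (L : List (Int × Int × Int)) : Prop :=
  preOk 0 (maxV L) L = true
instance (L : List (Int × Int × Int)) : Decidable (Pre_mgraf L) := by
  unfold Pre_mgraf; infer_instance

def pvWitness_mgraf : (List (Int × Int × Int)) := [(0, 2, 5), (2, 1, -3)]

def Spec_mgraf (L : List (Int × Int × Int)) (out : List (List (Int × Int))) : Prop := out = mgraf_alt L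
instance (L : List (Int × Int × Int)) (out : List (List (Int × Int))) : Decidable (Spec_mgraf L out) := by unfold Spec_mgraf; infer_instance

-- ===== CLAIM (what is proved, stated in full; the proofs are below) =====
def Claim_equal_mgraf : Prop := ∀ (L : List (Int × Int × Int)), Dom_mgraf L → Pre_mgraf L → Spec_mgraf L (mgraf L)

-- ===== LEMMAS AND PROOFS =====

theorem appendAt_length (G : List (List (Int × Int))) (i : Int) (p : Int × Int) :
    (appendAt G i p).length = G.length := by
  simp [appendAt]

theorem appendAt_append (X P : List (List (Int × Int))) (i : Int) (p : Int × Int)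
    (h0 : 0 ≤ i) (h1 : i < (X.length : Int)) :
    appendAt (X ++ P) i p = appendAt X i p ++ P := by
  have hj : i.toNat < X.length := by omega
  simp [appendAt, h0, List.getD, List.getElem?_append_left hj, List.set_append_left _ _ hj]

theorem growToGo_eq (u v : Int) (f : Nat) :
    ∀ G : List (List (Int × Int)), 1 ≤ G.length →
    (max u v + 1 - (G.length : Int)).toNat ≤ f →
    growToGo u v f G =
      G ++ List.replicate ((max (max ((G.length : Int) - 1) u) v).toNat + 1 - G.length) [] := by
  induction f with
  | zero =>
    intro G h hf
    simp only [growToGo, List.self_eq_append_right, List.replicate_eq_nil_iff]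
    omega
  | succ f ih =>
    intro G h hf
    by_cases hc : (G.length : Int) ≤ u ∨ (G.length : Int) ≤ v
    · rw [growToGo, if_pos hc,
        ih (G ++ [[]]) (by simp)
          (by simp only [List.length_append, List.length_cons, List.length_nil]; omega),
        List.append_assoc]
      congr 1
      have hm : max (max (((G ++ [[]]).length : Int) - 1) u) v
          = max (max ((G.length : Int) - 1) u) v := by
        simp only [List.length_append, List.length_cons, List.length_nil]
        omega
      rw [hm]
      have : (max (max ((G.length : Int) - 1) u) v).toNat + 1 - G.length
          = ((max (max ((G.length : Int) - 1) u) v).toNat + 1 - (G ++ [[]]).length) + 1 := by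
        simp only [List.length_append, List.length_cons, List.length_nil]
        omega
      rw [this, List.replicate_succ]
      rfl
    · rw [growToGo, if_neg hc]
      simp only [List.self_eq_append_right, List.replicate_eq_nil_iff]
      omega

theorem growTo_eq (G : List (List (Int × Int))) (u v : Int) (h : 1 ≤ G.length) :
    growTo G u v =
      G ++ List.replicate ((max (max ((G.length : Int) - 1) u) v).toNat + 1 - G.length) [] ∧
    ((growTo G u v).length : Int) = max (max ((G.length : Int) - 1) u) v + 1 := by
  have e := growToGo_eq u v (max u v + 1 - (G.length : Int)).toNat G h le_rfl
  refine ⟨e, ?_⟩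
  rw [growTo, e]
  simp only [List.length_append, List.length_replicate]
  omega

theorem fold_max_le (rest : List (Int × Int × Int)) (m : Int) :
    m ≤ rest.foldl (fun m t => max (max m t.1) t.2.1) m := by
  induction rest generalizing m with
  | nil => simp
  | cons s rs ih =>
    simp only [List.foldl_cons]
    exact le_trans (by omega) (ih (max (max m s.1) s.2.1))

theorem replicate_append_nil (a b : Nat) :
    (List.replicate a ([] : List (Int × Int))) ++ List.replicate b [] = List.replicate (a + b) [] := by
  rw [← List.replicate_add]

-- main invariant: B's fold from any nonempty state equals A's fold from that state
-- padded with empty lists up to the final size, and B's final length is that size.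
theorem main_inv (L : List (Int × Int × Int)) (G : List (List (Int × Int)))
    (hpre : preOk ((G.length : Int) - 1)
      (L.foldl (fun m t => max (max m t.1) t.2.1) ((G.length : Int) - 1)) L = true)
    (h : 1 ≤ G.length) :
    L.foldl (fun G t =>
        let G := growTo G t.1 t.2.1
        appendAt (appendAt G t.1 (t.2.1, t.2.2)) t.2.1 (t.1, t.2.2)) G
      = L.foldl (fun G t => appendAt (appendAt G t.1 (t.2.1, t.2.2)) t.2.1 (t.1, t.2.2))
          (G ++ List.replicate
            ((L.foldl (fun m t => max (max m t.1) t.2.1) ((G.length : Int) - 1)).toNat + 1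
              - G.length) [])
      ∧ ((L.foldl (fun G t =>
          let G := growTo G t.1 t.2.1
          appendAt (appendAt G t.1 (t.2.1, t.2.2)) t.2.1 (t.1, t.2.2)) G).length : Int)
        = L.foldl (fun m t => max (max m t.1) t.2.1) ((G.length : Int) - 1) + 1 := by
  induction L generalizing G with
  | nil => simp; omega
  | cons t rest ih =>
    obtain ⟨hg, hgl⟩ := growTo_eq G t.1 t.2.1 h
    set G1 := growTo G t.1 t.2.1 with hG1
    have hG1len : (G1.length : Int) = max (max ((G.length : Int) - 1) t.1) t.2.1 + 1 := hgl
    set G2 := appendAt (appendAt G1 t.1 (t.2.1, t.2.2)) t.2.1 (t.1, t.2.2) with hG2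
    have hG2len : G2.length = G1.length := by
      simp [hG2, appendAt_length]
    have h2 : 1 ≤ G2.length := by omega
    -- unpack the precondition for the head edge and the tail
    rw [List.foldl_cons] at hpre
    have hacc : max (max ((G.length : Int) - 1) t.1) t.2.1 = (G2.length : Int) - 1 := by omega
    rw [preOk] at hpre
    simp only [hacc, Bool.and_eq_true, Bool.or_eq_true, decide_eq_true_eq, beq_iff_eq] at hpre
    obtain ⟨hhead, htail⟩ := hpre
    obtain ⟨e, hl⟩ := ih G2 htail h2
    have hfold : rest.foldl (fun m t => max (max m t.1) t.2.1) ((G2.length : Int) - 1)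
        = (t :: rest).foldl (fun m t => max (max m t.1) t.2.1) ((G.length : Int) - 1) := by
      simp only [List.foldl_cons]; congr 1; omega
    have hM := fold_max_le rest (max (max ((G.length : Int) - 1) t.1) t.2.1)
    set M := (t :: rest).foldl (fun m t => max (max m t.1) t.2.1) ((G.length : Int) - 1) with hMdef
    have hMge : max (max ((G.length : Int) - 1) t.1) t.2.1 ≤ M := by
      rw [hMdef]; simp only [List.foldl_cons]; exact hM
    have hlen1 : G1.length = G.length
        + ((max (max ((G.length : Int) - 1) t.1) t.2.1).toNat + 1 - G.length) := by
      rw [hg]; simp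
    have hpad : G ++ List.replicate (M.toNat + 1 - G.length) []
        = G1 ++ List.replicate (M.toNat + 1 - G1.length) [] := by
      rw [hg, List.append_assoc, replicate_append_nil]
      congr 2
      simp only [List.length_append, List.length_replicate]
      omega
    have hstep : appendAt (appendAt (G ++ List.replicate (M.toNat + 1 - G.length) [])
          t.1 (t.2.1, t.2.2)) t.2.1 (t.1, t.2.2)
        = G2 ++ List.replicate (M.toNat + 1 - G2.length) [] := by
      rcases hhead with ⟨hu, hv⟩ | ⟨hm, _, _⟩
      · -- both endpoints nonnegative: appendAt commutes with the padding
        have hu1 : t.1 < (G1.length : Int) := by omega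
        have hv1 : t.2.1 < ((appendAt G1 t.1 (t.2.1, t.2.2)).length : Int) := by
          rw [appendAt_length]; omega
        rw [hpad, appendAt_append _ _ _ _ hu hu1, appendAt_append _ _ _ _ hv hv1, hG2len]
      · -- the running maximum has reached its final value: both pads are empty
        have hMm : M = (G1.length : Int) - 1 := by omega
        have hz1 : M.toNat + 1 - G1.length = 0 := by omega
        have hz2 : M.toNat + 1 - G2.length = 0 := by omega
        rw [hpad, hz1, hz2]
        simp only [List.replicate_zero, List.append_nil]
        rw [hG2]
    refine ⟨?_, ?_⟩
    · simp only [List.foldl_cons]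
      rw [e, hfold]
      congr 1
      rw [hstep]
    · simp only [List.foldl_cons]
      rw [hl, hfold]

-- ===== VERDICT (by name: the statement is the Claim_ definition above) =====
theorem mgraf_spec : Claim_equal_mgraf := by
  intro L _hdom hpre
  unfold Spec_mgraf mgraf mgraf_alt
  unfold Pre_mgraf maxV at hpre
  obtain ⟨e, _⟩ := main_inv L [[]] (by simpa using hpre) (by simp)
  rw [e]
  have hM := fold_max_le L 0
  have h0 : ((([[]] : List (List (Int × Int))).length : Int) - 1) = 0 := by simp
  rw [h0]
  set M := L.foldl (fun m t => max (max m t.1) t.2.1) 0 with hMdef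
  have : (M + 1).toNat = 1 + (M.toNat + 1 - 1) := by omega
  simp [List.map_const', this, List.replicate_add, List.replicate_succ]
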